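-- pv_equiv track=rewrite | github.com/automl/neps | neps/search_spaces/architecture/cfg.py | remove_subtree
-- ===== SOURCE A (Python) =====
-- def remove_subtree(tree: str, index: int) -> tuple[str, str, str]:
--     """Helper functioon to remove a subtree from a parse tree
--     given its index.
--     E.g. '(S (S (T 2)) (ADD +) (T 1))'
--     becomes '(S (S (T 2)) ', '(T 1))'  after removing (ADD +).
--
--     Args:
--         tree (str): parse tree
--         index (int): index of the subtree root node
--
--     Returns:
--         Tuple[str, str, str]: part before the subtree, subtree, part past subtree
--     """
--     split_tree = tree.split(" ")
--     pre_subtree = " ".join(split_tree[:index]) + " "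
--     #  get chars to the right of split
--     right = " ".join(split_tree[index + 1 :])
--     # remove chosen subtree
--     # single pass to find the bracket matching the start of the split
--     counter, current_index = 1, 0
--     for char in right:
--         if char == "(":
--             counter += 1
--         elif char == ")":
--             counter -= 1
--         if counter == 0:
--             break
--         current_index += 1
--     post_subtree = right[current_index + 1 :]
--     removed = "".join(split_tree[index]) + " " + right[: current_index + 1]
--     return (pre_subtree, removed, post_subtree)
-- ===== SOURCE B (Python) =====
-- import bisect
--
-- def remove_subtree(tree: str, index: int) -> tuple[str, str, str]:
--     split_tree = tree.split(" ")
--     pre_subtree = " ".join(split_tree[:index]) + " "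
--     right = " ".join(split_tree[index + 1:])
--     # positions of the brackets in `right`
--     opens = [i for i, ch in enumerate(right) if ch == "("]
--     closes = [i for i, ch in enumerate(right) if ch == ")"]
--     # The subtree ends at the first ')' whose number of '(' strictly before it
--     # equals its own ordinal among the ')' (then the implicit depth 1 + #opens - #closes
--     # first reaches 0 there); if no such ')', the whole of `right` belongs to it.
--     cut = len(right)
--     for m, c in enumerate(closes):
--         if bisect.bisect_left(opens, c) == m:
--             cut = c + 1
--             break
--     return (pre_subtree, split_tree[index] + " " + right[:cut], right[cut:])
-- ===== Notes on version B (the rewrite author's own statement) =====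
-- stated objective: alternative
-- what changed: Instead of running a bracket-depth counter over the characters, B extracts the position lists of '(' and ')' and finds the matching close as the first ')' whose bisect_left rank among the opens equals its own ordinal; the running counter disappears entirely.
import Mathlib
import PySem

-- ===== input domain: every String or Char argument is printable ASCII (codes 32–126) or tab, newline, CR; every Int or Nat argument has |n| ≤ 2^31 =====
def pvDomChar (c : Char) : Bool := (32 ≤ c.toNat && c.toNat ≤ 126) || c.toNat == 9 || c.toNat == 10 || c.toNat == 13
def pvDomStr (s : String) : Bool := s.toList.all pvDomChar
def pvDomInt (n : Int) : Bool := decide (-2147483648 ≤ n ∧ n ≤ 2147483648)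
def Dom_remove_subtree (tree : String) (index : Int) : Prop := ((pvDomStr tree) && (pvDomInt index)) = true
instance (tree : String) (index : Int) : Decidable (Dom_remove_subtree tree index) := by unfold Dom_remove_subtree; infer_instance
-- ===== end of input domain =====

-- B replaces A's running depth-counter loop by extracting the bracket position lists and
-- rank-matching the first ')' whose bisect_left rank among the '(' equals its ordinal;
-- same linear reassembly, equivalence proved on all inputs where A does not raise.

-- ===== PORT A =====
-- A's `for char in right` loop with `break`: counter starts at ctr, i is current_index.
def removeSubtreeLoopA : List Char → Int → Nat → Nat
  | [], _, i => i
  | c :: cs, ctr, i =>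
    let ctr' := if c = '(' then ctr + 1 else if c = ')' then ctr - 1 else ctr
    if ctr' = 0 then i else removeSubtreeLoopA cs ctr' (i + 1)

def remove_subtree (tree : String) (index : Int) : String × String × String :=
  let split_tree := PySem.Chars.splitOn tree.toList [' ']
  let pre_subtree := PySem.Chars.join [' '] (PySem.List.slice split_tree none (some index)) ++ [' ']
  let right := PySem.Chars.join [' '] (PySem.List.slice split_tree (some (index + 1)) none)
  let current_index := removeSubtreeLoopA right 1 0
  let post_subtree := PySem.List.slice right (some ((current_index : Int) + 1)) none
  -- `"".join(split_tree[index])` over a str is that str itself (join of its characters by "")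
  let removed := PySem.List.pyGetD split_tree index [] ++ [' ']
      ++ PySem.List.slice right none (some ((current_index : Int) + 1))
  (String.ofList pre_subtree, String.ofList removed, String.ofList post_subtree)

-- ===== PORT B =====
-- [i for i, ch in enumerate(right) if ch == t]
def removeSubtreePositions (cs : List Char) (t : Char) : List Int :=
  (PySem.List.enumerate cs).filterMap (fun p => if p.2 = t then some p.1 else none)

-- `for m, c in enumerate(closes): if bisect_left(opens, c) == m: cut = c+1; break`
-- bisect.bisect_left on the sorted list `opens` = number of its elements < c (its contract).
def removeSubtreeFindCut : List Int → Int → List Int → Option Int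
  | [], _, _ => none
  | c :: rest, m, opens =>
    if ((opens.countP (fun o => o < c) : Int)) = m then some (c + 1)
    else removeSubtreeFindCut rest (m + 1) opens

def remove_subtree_alt (tree : String) (index : Int) : String × String × String :=
  let split_tree := PySem.Chars.splitOn tree.toList [' ']
  let pre_subtree := PySem.Chars.join [' '] (PySem.List.slice split_tree none (some index)) ++ [' ']
  let right := PySem.Chars.join [' '] (PySem.List.slice split_tree (some (index + 1)) none)
  let opens := removeSubtreePositions right '('
  let closes := removeSubtreePositions right ')'
  let cut := (removeSubtreeFindCut closes 0 opens).getD (right.length : Int)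
  let removed := PySem.List.pyGetD split_tree index [] ++ [' ']
      ++ PySem.List.slice right none (some cut)
  (String.ofList pre_subtree, String.ofList removed, String.ofList (PySem.List.slice right (some cut) none))

-- ===== PRECONDITION & SPEC =====
-- Pre_ excludes exactly the inputs where `split_tree[index]` raises IndexError in A.
def Pre_remove_subtree (tree : String) (index : Int) : Prop :=
  PySem.Raise.InRange (PySem.Chars.splitOn tree.toList [' ']).length index
instance (tree : String) (index : Int) : Decidable (Pre_remove_subtree tree index) := by
  unfold Pre_remove_subtree; infer_instance
def pvWitness_remove_subtree : String × Int := ("(S (S (T 2)) (ADD +) (T 1))", 4)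

def Spec_remove_subtree (tree : String) (index : Int) (out : String × String × String) : Prop := out = remove_subtree_alt tree index
instance (tree : String) (index : Int) (out : String × String × String) : Decidable (Spec_remove_subtree tree index out) := by unfold Spec_remove_subtree; infer_instance

-- ===== CLAIM (what is proved, stated in full; the proofs are below) =====
def Claim_equal_remove_subtree : Prop := ∀ (tree : String) (index : Int), Dom_remove_subtree tree index → Pre_remove_subtree tree index → Spec_remove_subtree tree index (remove_subtree tree index)

-- ===== LEMMAS AND PROOFS =====

-- running depths after each character, starting (exclusive) from d
def removeSubtreeDelta (c : Char) : Int := if c = '(' then 1 else if c = ')' then -1 else 0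

def removeSubtreeScan : List Char → Int → List Int
  | [], _ => []
  | c :: cs, d => (d + removeSubtreeDelta c) :: removeSubtreeScan cs (d + removeSubtreeDelta c)

-- positions (from offset k) of the occurrences of t
def removeSubtreePosFrom : List Char → Int → Char → List Int
  | [], _, _ => []
  | c :: cs, k, t => if c = t then k :: removeSubtreePosFrom cs (k + 1) t
                     else removeSubtreePosFrom cs (k + 1) t

theorem removeSubtreePositions_eq_posFrom (cs : List Char) (k : Int) (t : Char) :
    (PySem.List.enumerate cs k).filterMap (fun p => if p.2 = t then some p.1 else none)
      = removeSubtreePosFrom cs k t := by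
  induction cs generalizing k with
  | nil => simp [removeSubtreePosFrom, PySem.List.enumerate_nil]
  | cons c cs ih =>
    rw [PySem.List.enumerate_cons]
    simp only [List.filterMap_cons, removeSubtreePosFrom]
    by_cases h : c = t <;> simp [h, ih]

theorem removeSubtreePosFrom_ge (cs : List Char) (k : Int) (t : Char) :
    ∀ o ∈ removeSubtreePosFrom cs k t, k ≤ o := by
  induction cs generalizing k with
  | nil => simp [removeSubtreePosFrom]
  | cons c cs ih =>
    intro o ho
    simp only [removeSubtreePosFrom] at ho
    by_cases h : c = t
    · rw [if_pos h] at ho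
      rcases List.mem_cons.mp ho with h' | h'
      · omega
      · have := ih (k + 1) o h'; omega
    · rw [if_neg h] at ho
      have := ih (k + 1) o ho; omega

theorem removeSubtreeDelta_open : removeSubtreeDelta '(' = 1 := by decide
theorem removeSubtreeDelta_close : removeSubtreeDelta ')' = -1 := by decide

theorem removeSubtreeFindCut_scan (cs : List Char) (k : Int) (m : Int)
    (opensPre : List Int) (d : Int)
    (hpre : ∀ o ∈ opensPre, o < k)
    (hinv : d = 1 + (opensPre.length : Int) - m) (hd : 1 ≤ d) :
    removeSubtreeFindCut (removeSubtreePosFrom cs k ')') m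
        (opensPre ++ removeSubtreePosFrom cs k '(')
      = Option.map (fun p : Nat => k + (p : Int) + 1)
          ((removeSubtreeScan cs d).findIdx? (fun v => v == 0)) := by
  induction cs generalizing k m opensPre d with
  | nil => simp [removeSubtreePosFrom, removeSubtreeScan, removeSubtreeFindCut]
  | cons c cs ih =>
    by_cases hop : c = '('
    · -- opens gains k, closes unchanged
      have h1 : removeSubtreePosFrom (c :: cs) k ')' = removeSubtreePosFrom cs (k + 1) ')' := by
        simp [removeSubtreePosFrom, hop]
      have h2 : removeSubtreePosFrom (c :: cs) k '(' = k :: removeSubtreePosFrom cs (k + 1) '(' := by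
        simp [removeSubtreePosFrom, hop]
      rw [h1, h2]
      have hassoc : opensPre ++ k :: removeSubtreePosFrom cs (k + 1) '('
          = (opensPre ++ [k]) ++ removeSubtreePosFrom cs (k + 1) '(' := by simp
      rw [hassoc]
      have hrec := ih (k + 1) m (opensPre ++ [k]) (d + 1)
        (by intro o ho; rcases List.mem_append.mp ho with h' | h'
            · have := hpre o h'; omega
            · simp at h'; omega)
        (by simp only [List.length_append, List.length_cons, List.length_nil]; push_cast; omega)
        (by omega)
      rw [hrec]
      have hscan : removeSubtreeScan (c :: cs) d = (d + 1) :: removeSubtreeScan cs (d + 1) := by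
        rw [hop]; simp [removeSubtreeScan, removeSubtreeDelta_open]
      rw [hscan, List.findIdx?_cons]
      have : ¬ (d + 1 = 0) := by omega
      simp only [beq_iff_eq, this, if_false, Option.map_map]
      congr 1; funext p; simp; omega
    · by_cases hcl : c = ')'
      · have h1 : removeSubtreePosFrom (c :: cs) k ')' = k :: removeSubtreePosFrom cs (k + 1) ')' := by
          simp [removeSubtreePosFrom, hcl]
        have h2 : removeSubtreePosFrom (c :: cs) k '(' = removeSubtreePosFrom cs (k + 1) '(' := by
          simp [removeSubtreePosFrom, hcl]
        rw [h1, h2]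
        have hscan : removeSubtreeScan (c :: cs) d = (d - 1) :: removeSubtreeScan cs (d - 1) := by
          have hm : d + removeSubtreeDelta ')' = d - 1 := by
            rw [removeSubtreeDelta_close]; ring
          rw [hcl]
          simp only [removeSubtreeScan, hm]
        rw [hscan]
        have hcount : ((opensPre ++ removeSubtreePosFrom cs (k + 1) '(').countP (fun o => o < k) : Int)
            = (opensPre.length : Int) := by
          rw [List.countP_append]
          have hA : opensPre.countP (fun o => o < k) = opensPre.length :=
            List.countP_eq_length.mpr (by intro o ho; simpa using hpre o ho)
          have hB : (removeSubtreePosFrom cs (k + 1) '(').countP (fun o => o < k) = 0 := by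
            rw [List.countP_eq_zero]
            intro o ho
            have := removeSubtreePosFrom_ge cs (k + 1) '(' o ho
            simp; omega
          rw [hA, hB]; simp
        rw [removeSubtreeFindCut, List.findIdx?_cons]
        by_cases hz : d = 1
        · have hc : ((opensPre ++ removeSubtreePosFrom cs (k + 1) '(').countP (fun o => o < k) : Int) = m := by
            rw [hcount]; omega
          rw [if_pos hc]
          have : (d - 1 == 0) = true := by simp; omega
          rw [this]
          simp
        · have hc : ¬ ((opensPre ++ removeSubtreePosFrom cs (k + 1) '(').countP (fun o => o < k) : Int) = m := by
            rw [hcount]; omega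
          rw [if_neg hc]
          have hne : (d - 1 == 0) = false := by simp; omega
          rw [hne]
          have hrec := ih (k + 1) (m + 1) opensPre (d - 1)
            (by intro o ho; have := hpre o ho; omega)
            (by omega) (by omega)
          simp only [if_false, Bool.false_eq_true]
          rw [hrec, Option.map_map]
          congr 1; funext p; simp; omega
      · have h1 : removeSubtreePosFrom (c :: cs) k ')' = removeSubtreePosFrom cs (k + 1) ')' := by
          simp [removeSubtreePosFrom, hcl]
        have h2 : removeSubtreePosFrom (c :: cs) k '(' = removeSubtreePosFrom cs (k + 1) '(' := by
          simp [removeSubtreePosFrom, hop]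
        rw [h1, h2]
        have hdz : removeSubtreeDelta c = 0 := by simp [removeSubtreeDelta, hop, hcl]
        have hscan : removeSubtreeScan (c :: cs) d = d :: removeSubtreeScan cs d := by
          simp [removeSubtreeScan, hdz]
        rw [hscan, List.findIdx?_cons]
        have : ¬ (d = 0) := by omega
        simp only [beq_iff_eq, this, if_false, Option.map_map]
        have hrec := ih (k + 1) m opensPre d
          (by intro o ho; have := hpre o ho; omega) (by omega) hd
        rw [hrec]
        congr 1; funext p; simp; omega

-- A's loop: accumulator shift, then characterisation as first zero of the scan
theorem removeSubtreeLoopA_acc (cs : List Char) (ctr : Int) (i : Nat) :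
    removeSubtreeLoopA cs ctr i = i + removeSubtreeLoopA cs ctr 0 := by
  induction cs generalizing ctr i with
  | nil => simp [removeSubtreeLoopA]
  | cons c cs ih =>
    simp only [removeSubtreeLoopA]
    by_cases h : (if c = '(' then ctr + 1 else if c = ')' then ctr - 1 else ctr) = 0
    · simp [h]
    · simp only [if_neg h]
      rw [ih _ (i + 1), ih _ 1]; omega

theorem removeSubtreeLoopA_findIdx (cs : List Char) (ctr : Int) :
    removeSubtreeLoopA cs ctr 0
      = ((removeSubtreeScan cs ctr).findIdx? (fun v => v == 0)).getD cs.length := by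
  induction cs generalizing ctr with
  | nil => simp [removeSubtreeLoopA, removeSubtreeScan]
  | cons c cs ih =>
    simp only [removeSubtreeLoopA, removeSubtreeScan, List.findIdx?_cons]
    have hctr : (if c = '(' then ctr + 1 else if c = ')' then ctr - 1 else ctr)
        = ctr + removeSubtreeDelta c := by
      unfold removeSubtreeDelta; split_ifs <;> omega
    rw [hctr]
    by_cases h0 : ctr + removeSubtreeDelta c = 0
    · simp [h0]
    · simp only [h0, beq_iff_eq, if_false]
      rw [removeSubtreeLoopA_acc _ _ 1, ih]
      cases hf : (removeSubtreeScan cs (ctr + removeSubtreeDelta c)).findIdx? (fun v => v == 0) with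
      | none => simp; omega
      | some k => simp [Nat.add_comm]

-- ===== VERDICT (by name: the statement is the Claim_ definition above) =====
theorem remove_subtree_spec : Claim_equal_remove_subtree := by
  intro tree index _ _
  unfold Spec_remove_subtree remove_subtree remove_subtree_alt removeSubtreePositions
  simp only []
  set right := PySem.Chars.join [' ']
      (PySem.List.slice (PySem.Chars.splitOn tree.toList [' ']) (some (index + 1)) none) with hright
  rw [removeSubtreePositions_eq_posFrom right 0 '(', removeSubtreePositions_eq_posFrom right 0 ')']
  have hB := removeSubtreeFindCut_scan right 0 0 [] 1 (by simp) (by simp) (by omega)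
  simp only [List.nil_append] at hB
  rw [hB]
  have hA := removeSubtreeLoopA_findIdx right 1
  rw [hA]
  cases hf : (removeSubtreeScan right 1).findIdx? (fun v => v == 0) with
  | some p =>
    simp only [Option.map_some, Option.getD_some]
    have hcast : ((p : Int) + 1) = 0 + (p : Int) + 1 := by ring
    rw [← hcast]
  | none =>
    simp only [Option.map_none, Option.getD_none]
    have h1 : PySem.List.slice right (some ((right.length : Int) + 1)) none
        = PySem.List.slice right (some ((right.length : Int))) none := by
      have : ((right.length : Int) + 1) = ((right.length + 1 : Nat) : Int) := by push_cast; ring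
      rw [this, PySem.List.slice_from_natCast, PySem.List.slice_from_natCast]
      simp
    have h2 : PySem.List.slice right none (some ((right.length : Int) + 1))
        = PySem.List.slice right none (some ((right.length : Int))) := by
      have : ((right.length : Int) + 1) = ((right.length + 1 : Nat) : Int) := by push_cast; ring
      rw [this, PySem.List.slice_to_natCast, PySem.List.slice_to_natCast]
      simp
    rw [h1, h2]
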